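-- pv_equiv track=rewrite | github.com/PCManticore/copyrite | src/copyrite/copyrite.py | _spans
-- ===== SOURCE A (Python) =====
-- def _spans(dates):
--     """Get the consecutive spans from the given dates."""
--     spans = []
--     current_span = []
--     prev = 0
--     for date in dates:
--         if date == prev + 1:
--             current_span.append(date)
--         else:
--             spans.append(list(current_span))
--             current_span.clear()
--             current_span.append(date)
--         prev = date
--     spans.append(current_span)
--     return list(filter(None, spans))
-- ===== SOURCE B (Python) =====
-- from itertools import groupby
--
--
-- def _spans(dates):
--     """Get the consecutive spans from the given dates."""
--     return [[date for _, date in group]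
--             for _, group in groupby(enumerate(dates), key=lambda p: p[1] - p[0])]
-- ===== Notes on version B (the rewrite author's own statement) =====
-- stated objective: idiomatic
-- what changed: Replaces A's running prev-comparison with manual flush/clear of a current span by itertools.groupby over enumerate(dates) keyed on date-index, which is constant exactly on a consecutive run.
import Mathlib
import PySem

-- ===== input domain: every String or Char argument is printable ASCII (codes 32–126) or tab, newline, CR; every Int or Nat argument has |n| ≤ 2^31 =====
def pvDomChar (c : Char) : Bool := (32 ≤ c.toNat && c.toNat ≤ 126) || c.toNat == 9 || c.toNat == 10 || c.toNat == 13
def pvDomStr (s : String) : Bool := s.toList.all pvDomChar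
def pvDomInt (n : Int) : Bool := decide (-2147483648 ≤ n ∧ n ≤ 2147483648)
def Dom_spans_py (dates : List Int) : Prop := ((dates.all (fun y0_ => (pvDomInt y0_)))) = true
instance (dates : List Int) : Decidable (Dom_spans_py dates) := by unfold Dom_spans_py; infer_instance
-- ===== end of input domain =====

-- B replaces A's running prev-comparison with manual flush/clear by groupby over enumerate keyed on date - index (idiomatic; same cost).

-- ===== PORT A =====
-- the loop body: state = (spans, current_span, prev)
def pvStepA (st : List (List Int) × List Int × Int) (date : Int) : List (List Int) × List Int × Int :=
  if date == st.2.2 + 1 then (st.1, st.2.1 ++ [date], date)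
  else (st.1 ++ [st.2.1], [date], date)

def spans_py (dates : List Int) : List (List Int) :=
  let st := dates.foldl pvStepA ([], [], 0)
  ((st.1 ++ [st.2.1]).filter (fun s => !s.isEmpty))  -- list(filter(None, spans)) after the final append

-- ===== PORT B =====
-- enumerate(dates): hand port (exact: pairs each element with its index, starting at n)
def pvEnumFrom : Int → List Int → List (Int × Int)
  | _, [] => []
  | n, d :: ds => (n, d) :: pvEnumFrom (n + 1) ds

-- itertools.groupby with key p.2 - p.1, each group listified (exact for a finite list of pairs)
def pvGroupAdj : List (Int × Int) → List (List (Int × Int))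
  | [] => []
  | x :: xs =>
    match pvGroupAdj xs with
    | [] => [[x]]
    | [] :: gs => [x] :: gs
    | (y :: g) :: gs =>
      if x.2 - x.1 == y.2 - y.1 then (x :: y :: g) :: gs else [x] :: (y :: g) :: gs

def spans_py_alt (dates : List Int) : List (List Int) :=
  (pvGroupAdj (pvEnumFrom 0 dates)).map (fun g => g.map Prod.snd)

-- ===== PRECONDITION & SPEC =====
def Spec_spans_py (dates : List Int) (out : List (List Int)) : Prop := out = spans_py_alt dates
instance (dates : List Int) (out : List (List Int)) : Decidable (Spec_spans_py dates out) := by unfold Spec_spans_py; infer_instance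

-- ===== CLAIM (what is proved, stated in full; the proofs are below) =====
def Claim_equal_spans_py : Prop := ∀ (dates : List Int), Dom_spans_py dates → Spec_spans_py dates (spans_py dates)

-- ===== LEMMAS AND PROOFS =====

-- canonical recursive grouping of consecutive runs, the common reference point
def pvChunks : List Int → List (List Int)
  | [] => []
  | d :: ds =>
    match pvChunks ds with
    | [] => [[d]]
    | [] :: gs => [d] :: gs
    | (e :: g) :: gs => if e = d + 1 then (d :: e :: g) :: gs else [d] :: (e :: g) :: gs

-- A's loop, rephrased forward: current span `cur`, last seen `prev`, remaining dates
def pvSpansFrom : List Int → Int → List Int → List (List Int)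
  | cur, _, [] => [cur]
  | cur, prev, d :: ds =>
    if d = prev + 1 then pvSpansFrom (cur ++ [d]) d ds else cur :: pvSpansFrom [d] d ds

theorem pvChunks_cons_shape (d : Int) (ds : List Int) :
    ∃ t gs, pvChunks (d :: ds) = (d :: t) :: gs := by
  unfold pvChunks
  cases h : pvChunks ds with
  | nil => exact ⟨[], [], rfl⟩
  | cons g gs =>
    cases g with
    | nil => exact ⟨[], gs, rfl⟩
    | cons e g' =>
      by_cases he : e = d + 1
      · exact ⟨e :: g', gs, by simp [he]⟩
      · exact ⟨[], (e :: g') :: gs, by simp [he]⟩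

theorem pvGroupAdj_cons_shape (x : Int × Int) (xs : List (Int × Int)) :
    ∃ t gs, pvGroupAdj (x :: xs) = (x :: t) :: gs := by
  unfold pvGroupAdj
  cases h : pvGroupAdj xs with
  | nil => exact ⟨[], [], rfl⟩
  | cons g gs =>
    cases g with
    | nil => exact ⟨[], gs, rfl⟩
    | cons y g' =>
      by_cases hk : x.2 - x.1 == y.2 - y.1
      · exact ⟨y :: g', gs, by simp [hk]⟩
      · exact ⟨[], (y :: g') :: gs, by simp [hk]⟩

-- extending a span across the head chunk
theorem pvSpansFrom_key : ∀ (ds : List Int) (c t : List Int) (d : Int) (gs : List (List Int)),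
    pvChunks (d :: ds) = (d :: t) :: gs →
    pvSpansFrom (c ++ [d]) d ds = (c ++ d :: t) :: gs := by
  intro ds
  induction ds with
  | nil =>
    intro c t d gs h
    simp only [pvChunks] at h
    obtain ⟨h1, h2⟩ := List.cons.injEq .. ▸ h
    obtain ⟨-, h1⟩ := List.cons.injEq .. ▸ h1
    subst h1; subst h2
    simp [pvSpansFrom]
  | cons e ds' ih =>
    intro c t d gs h
    obtain ⟨t', gs', hsh'⟩ := pvChunks_cons_shape e ds'
    have hunf : pvChunks (d :: e :: ds') =
        match pvChunks (e :: ds') with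
        | [] => [[d]]
        | [] :: gs => [d] :: gs
        | (x :: g) :: gs => if x = d + 1 then (d :: x :: g) :: gs else [d] :: (x :: g) :: gs :=
      rfl
    have hd : pvChunks (d :: e :: ds') =
        if e = d + 1 then (d :: e :: t') :: gs' else [d] :: (e :: t') :: gs' := by
      rw [hunf, hsh']
    rw [hd] at h
    show (if e = d + 1 then pvSpansFrom ((c ++ [d]) ++ [e]) e ds'
          else (c ++ [d]) :: pvSpansFrom [e] e ds') = _
    by_cases he : e = d + 1
    · rw [if_pos he] at h ⊢
      obtain ⟨h1, h2⟩ := List.cons.injEq .. ▸ h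
      obtain ⟨-, h1⟩ := List.cons.injEq .. ▸ h1
      subst h1; subst h2
      have := ih (c ++ [d]) t' e gs' (by rw [hsh'])
      rw [this]; simp
    · rw [if_neg he] at h ⊢
      obtain ⟨h1, h2⟩ := List.cons.injEq .. ▸ h
      obtain ⟨-, h1⟩ := List.cons.injEq .. ▸ h1
      subst h1; subst h2
      have := ih [] t' e gs' (by rw [hsh'])
      simp only [List.nil_append] at this
      rw [this]

theorem pvSpansFrom_single (d : Int) (ds : List Int) :
    pvSpansFrom [d] d ds = pvChunks (d :: ds) := by
  obtain ⟨t, gs, hshape⟩ := pvChunks_cons_shape d ds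
  have := pvSpansFrom_key ds [] t d gs hshape
  simp only [List.nil_append] at this
  rw [this, hshape]

-- A's foldl related to pvSpansFrom (invariant: the current span is nonempty)
theorem spans_py_fold : ∀ (ds : List Int) (s : List (List Int)) (cur : List Int) (prev : Int),
    cur ≠ [] →
    (((ds.foldl pvStepA (s, cur, prev)).1 ++ [(ds.foldl pvStepA (s, cur, prev)).2.1]).filter
        (fun x => !x.isEmpty)) =
      s.filter (fun x => !x.isEmpty) ++ pvSpansFrom cur prev ds := by
  intro ds
  induction ds with
  | nil =>
    intro s cur prev hcur
    simp [pvSpansFrom, List.filter_append, hcur]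
  | cons d ds ih =>
    intro s cur prev hcur
    simp only [List.foldl_cons]
    by_cases hp : d = prev + 1
    · have hstep : pvStepA (s, cur, prev) d = (s, cur ++ [d], d) := by
        simp [pvStepA, hp]
      rw [hstep, ih s (cur ++ [d]) d (by simp)]
      simp [pvSpansFrom, hp]
    · have hstep : pvStepA (s, cur, prev) d = (s ++ [cur], [d], d) := by
        simp [pvStepA, hp]
      rw [hstep, ih (s ++ [cur]) [d] d (by simp)]
      simp [pvSpansFrom, hp, List.filter_append, hcur]

-- B's groupby over enumerate equals pvChunks (index offset generalized)
theorem pvGroupAdj_enum : ∀ (l : List Int) (n : Int),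
    (pvGroupAdj (pvEnumFrom n l)).map (fun g => g.map Prod.snd) = pvChunks l := by
  intro l
  induction l with
  | nil => intro n; rfl
  | cons d ds ih =>
    intro n
    cases ds with
    | nil => rfl
    | cons e ds' =>
      obtain ⟨t, gs, hg⟩ := pvGroupAdj_cons_shape (n + 1, e) (pvEnumFrom (n + 1 + 1) ds')
      have hmap := ih (n + 1)
      rw [show pvEnumFrom (n + 1) (e :: ds') = (n + 1, e) :: pvEnumFrom (n + 1 + 1) ds' from rfl,
        hg] at hmap
      simp only [List.map_cons] at hmap
      have hga : pvGroupAdj (pvEnumFrom n (d :: e :: ds')) =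
          if d - n == e - (n + 1) then ((n, d) :: (n + 1, e) :: t) :: gs
          else [(n, d)] :: ((n + 1, e) :: t) :: gs := by
        show pvGroupAdj ((n, d) :: (n + 1, e) :: pvEnumFrom (n + 1 + 1) ds') = _
        unfold pvGroupAdj
        rw [hg]
      have hch : pvChunks (d :: e :: ds') =
          if e = d + 1 then (d :: e :: t.map Prod.snd) :: gs.map (fun g => g.map Prod.snd)
          else [d] :: (e :: t.map Prod.snd) :: gs.map (fun g => g.map Prod.snd) := by
        have hunf : pvChunks (d :: e :: ds') =
            match pvChunks (e :: ds') with
            | [] => [[d]]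
            | [] :: gs => [d] :: gs
            | (x :: g) :: gs => if x = d + 1 then (d :: x :: g) :: gs else [d] :: (x :: g) :: gs :=
          rfl
        rw [hunf, ← hmap]
      rw [hga, hch]
      by_cases he : e = d + 1
      · have hb : (d - n == e - (n + 1)) = true := by simp only [beq_iff_eq, he]; omega
        rw [hb]; simp [he]
      · have hb : (d - n == e - (n + 1)) = false := by
          simp only [beq_eq_false_iff_ne, ne_eq]
          omega
        rw [hb]; simp [he]

-- ===== VERDICT (by name: the statement is the Claim_ definition above) =====
theorem spans_py_spec : Claim_equal_spans_py := by
  intro dates _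
  show spans_py dates = spans_py_alt dates
  unfold spans_py spans_py_alt
  rw [pvGroupAdj_enum dates 0]
  cases dates with
  | nil => rfl
  | cons d ds =>
    simp only [List.foldl_cons]
    by_cases h1 : d = (0 : Int) + 1
    · have hstep : pvStepA ([], [], 0) d = ([], [d], d) := by simp [pvStepA, h1]
      rw [hstep, spans_py_fold ds [] [d] d (by simp)]
      simp [pvSpansFrom_single]
    · have hne : d ≠ 1 := by omega
      have hstep : pvStepA ([], [], 0) d = ([[]], [d], d) := by simp [pvStepA, hne]
      rw [hstep, spans_py_fold ds [[]] [d] d (by simp)]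
      simp [pvSpansFrom_single]
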